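-- pv_equiv track=rewrite | github.com/mikhail-dvorkin/competitions | hackerrank/hourrank7/C.py | solve
-- ===== SOURCE A (Python) =====
-- M = 10**9 + 7
--
-- def solve(n):
--     a = n
--     i = 1
--     while i < n:
--         k = n // i
--         j = min(n // k + 1, n)
--         a += k * (j - i) * n - k * (k + 1) * (j - i) * (i + j - 1) // 4
--         a %= M
--         i = j
--     return a
-- ===== SOURCE B (Python) =====
-- M = 10**9 + 7
--
-- def solve(n):
--     a = n
--     if n < 2:
--         return a
--     s = 0
--     while (s + 1) * (s + 1) <= n:
--         s += 1
--     # small t = 1..s, term by term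
--     for t in range(1, s + 1):
--         k = n // t
--         a = (a + (k * n - k * (k + 1) // 2 * t)) % M
--     # large t = s+1..n-1, grouped by the quotient q = n // t
--     for q in range(1, n // (s + 1) + 1):
--         lo = max(s, n // (q + 1))
--         hi = min(n // q, n - 1)
--         cnt = hi - lo
--         a = (a + (q * cnt * n - q * (q + 1) // 2 * ((lo + 1 + hi) * cnt // 2))) % M
--     return a
-- ===== Notes on version B (the rewrite author's own statement) =====
-- stated objective: alternative
-- what changed: B replaces A's block-jumping while loop (i jumping to the next floor-division block boundary, adding a closed-form block sum with a quarter-division factor) by an isqrt split: a per-term loop over the small indices up to isqrt(n) plus a loop indexed by the quotient value q = n//t with explicit interval bounds and a count/interval-sum formula.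
import Mathlib
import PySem

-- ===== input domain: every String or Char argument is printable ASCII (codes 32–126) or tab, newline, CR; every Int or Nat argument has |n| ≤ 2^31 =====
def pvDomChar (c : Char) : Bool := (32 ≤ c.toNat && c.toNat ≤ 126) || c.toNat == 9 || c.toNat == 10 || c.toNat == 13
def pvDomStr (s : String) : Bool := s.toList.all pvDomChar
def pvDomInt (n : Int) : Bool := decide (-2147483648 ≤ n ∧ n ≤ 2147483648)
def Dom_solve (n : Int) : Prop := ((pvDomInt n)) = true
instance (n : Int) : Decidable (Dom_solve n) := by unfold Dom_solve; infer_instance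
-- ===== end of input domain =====

-- B replaces A's block-jumping while loop by an isqrt split: a per-term loop for
-- small t plus a loop indexed by the quotient q = n // t for large t; same exact value.

def pvM : Int := 1000000007

-- ===== PORT A =====
-- A's while-loop jumps across floor-division blocks; fuel = n.toNat bounds the
-- iteration count (each step i strictly increases), a totality guard only.
def solveLoop (n : Int) : Nat → Int → Int → Int
  | 0, a, _ => a
  | fuel + 1, a, i =>
    if i < n then
      let k := PySem.Int.floordiv n i
      let j := min (PySem.Int.floordiv n k + 1) n
      solveLoop n fuel
        (PySem.Int.mod (a + (k * (j - i) * n -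
          PySem.Int.floordiv (k * (k + 1) * (j - i) * (i + j - 1)) 4)) pvM) j
    else a

def solve (n : Int) : Int := solveLoop n n.toNat n 1

-- ===== PORT B =====
-- while (s+1)*(s+1) <= n: s += 1   (fuel = n.toNat is a totality guard only)
def isqrtLoop (n : Int) : Nat → Int → Int
  | 0, s => s
  | fuel + 1, s => if (s + 1) * (s + 1) ≤ n then isqrtLoop n fuel (s + 1) else s

-- the body of B's small-t loop
def bStep (n a t : Int) : Int :=
  let k := PySem.Int.floordiv n t
  PySem.Int.mod (a + (k * n - PySem.Int.floordiv (k * (k + 1)) 2 * t)) pvM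

-- the body of B's quotient-indexed large-t loop
def qStep (n s a q : Int) : Int :=
  let lo := max s (PySem.Int.floordiv n (q + 1))
  let hi := min (PySem.Int.floordiv n q) (n - 1)
  let cnt := hi - lo
  PySem.Int.mod (a + (q * cnt * n - PySem.Int.floordiv (q * (q + 1)) 2 *
    PySem.Int.floordiv ((lo + 1 + hi) * cnt) 2)) pvM

def solve_alt (n : Int) : Int :=
  if n < 2 then n
  else
    let s := isqrtLoop n n.toNat 0
    let a1 := (PySem.List.pyRange 1 (s + 1) 1).foldl (bStep n) n
    (PySem.List.pyRange 1 (PySem.Int.floordiv n (s + 1) + 1) 1).foldl (qStep n s) a1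

-- ===== PRECONDITION & SPEC =====
def Spec_solve (n : Int) (out : Int) : Prop := out = solve_alt n
instance (n : Int) (out : Int) : Decidable (Spec_solve n out) := by unfold Spec_solve; infer_instance

-- ===== CLAIM (what is proved, stated in full; the proofs are below) =====
def Claim_equal_solve : Prop := ∀ (n : Int), Dom_solve n → Spec_solve n (solve n)

-- ===== LEMMAS AND PROOFS =====

-- the exact contribution of index t (before the mod)
def gterm (n t : Int) : Int :=
  let k := PySem.Int.floordiv n t
  k * n - PySem.Int.floordiv (k * (k + 1)) 2 * t

-- the exact contribution of quotient value q in B's second loop (before the mod)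
def qterm (n s q : Int) : Int :=
  let lo := max s (PySem.Int.floordiv n (q + 1))
  let hi := min (PySem.Int.floordiv n q) (n - 1)
  let cnt := hi - lo
  q * cnt * n - PySem.Int.floordiv (q * (q + 1)) 2 *
    PySem.Int.floordiv ((lo + 1 + hi) * cnt) 2

theorem bStep_fun (n : Int) :
    bStep n = fun a t => PySem.Int.mod (a + gterm n t) pvM := by
  funext a t; simp [bStep, gterm]

theorem qStep_fun (n s : Int) :
    qStep n s = fun a q => PySem.Int.mod (a + qterm n s q) pvM := by
  funext a q; simp [qStep, qterm]

theorem foldl_mod_sum (h : Int → Int) :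
    ∀ (l : List Int) (a : Int), l ≠ [] →
      l.foldl (fun acc t => PySem.Int.mod (acc + h t) pvM) a = (a + (l.map h).sum) % pvM := by
  intro l
  induction l with
  | nil => intro a hne; exact absurd rfl hne
  | cons t l ih =>
    intro a _
    cases l with
    | nil =>
      simp [PySem.Int.mod_eq_emod_of_pos (b := pvM) (by norm_num [pvM])]
    | cons u l' =>
      rw [List.foldl_cons, ih _ (by simp),
        PySem.Int.mod_eq_emod_of_pos (b := pvM) (by norm_num [pvM])]
      rw [List.map_cons, List.sum_cons]
      have : ((a + h t) % pvM + (h u + (l'.map h).sum)) % pvM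
          = (a + h t + (h u + (l'.map h).sum)) % pvM :=
        Int.emod_add_emod _ _ _
      rw [this]
      simp only [List.map_cons, List.sum_cons]
      congr 1; ring

theorem foldl_bStep_sum (n : Int) (l : List Int) (a : Int) (hne : l ≠ []) :
    l.foldl (bStep n) a = (a + (l.map (gterm n)).sum) % pvM := by
  rw [bStep_fun]; exact foldl_mod_sum (gterm n) l a hne

theorem sum_affine (c1 c2 : Int) :
    ∀ l : List Int, (l.map (fun t => c1 - c2 * t)).sum = (l.length : Int) * c1 - c2 * l.sum := by
  intro l
  induction l with
  | nil => simp
  | cons t l ih => simp [ih]; ring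

theorem two_mul_sum_pyRange (i : Int) :
    ∀ m : Nat, 2 * (PySem.List.pyRange i (i + m) 1).sum = m * (2 * i + m - 1) := by
  intro m
  induction m with
  | zero => simp
  | succ m ih =>
    have h : (i : Int) + (m + 1 : Nat) = (i + m) + 1 := by push_cast; ring
    rw [h, PySem.List.pyRange_one_succ_right (by omega : i ≤ i + (m : Int)), List.sum_append]
    push_cast
    push_cast at ih
    simp only [List.sum_cons, List.sum_nil]
    linear_combination ih

theorem pyRange_one_ne_nil {a b : Int} (h : a < b) : PySem.List.pyRange a b 1 ≠ [] := by
  rw [PySem.List.pyRange_one_cons h]; simp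

-- facts about k = n // i on a block start of A
theorem kfacts (n i : Int) (h1 : 1 ≤ i) (h2 : i < n) :
    1 ≤ PySem.Int.floordiv n i ∧ PySem.Int.floordiv n i * i ≤ n ∧
      n < (PySem.Int.floordiv n i + 1) * i := by
  have h := (PySem.Int.floordiv_eq_iff_of_pos (a := n) (b := i)
      (q := PySem.Int.floordiv n i) (by omega)).mp rfl
  obtain ⟨hlo, hhi⟩ := h
  refine ⟨?_, hlo, hhi⟩
  nlinarith

theorem i_lt_j (n i : Int) (h1 : 1 ≤ i) (h2 : i < n) :
    i < min (PySem.Int.floordiv n (PySem.Int.floordiv n i) + 1) n := by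
  obtain ⟨hk1, hlo, _⟩ := kfacts n i h1 h2
  have hik : i ≤ PySem.Int.floordiv n (PySem.Int.floordiv n i) := by
    rw [PySem.Int.le_floordiv_iff_mul_le (by omega)]
    nlinarith
  omega

-- n // t is constant on A's block [i, j)
theorem fd_const (n i t : Int) (h1 : 1 ≤ i) (h2 : i < n)
    (ht1 : i ≤ t) (ht2 : t < min (PySem.Int.floordiv n (PySem.Int.floordiv n i) + 1) n) :
    PySem.Int.floordiv n t = PySem.Int.floordiv n i := by
  obtain ⟨hk1, hlo, hhi⟩ := kfacts n i h1 h2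
  set k := PySem.Int.floordiv n i with hk
  have htk : t ≤ PySem.Int.floordiv n k := by omega
  have hnk := (PySem.Int.floordiv_eq_iff_of_pos (a := n) (b := k)
      (q := PySem.Int.floordiv n k) (by omega)).mp rfl
  rw [PySem.Int.floordiv_eq_iff_of_pos (by omega)]
  constructor
  · nlinarith [hnk.1]
  · nlinarith

-- one block of A's loop equals folding B's per-term step across the block's range
theorem block_eq (n a i : Int) (h1 : 1 ≤ i) (h2 : i < n) :
    (PySem.List.pyRange i (min (PySem.Int.floordiv n (PySem.Int.floordiv n i) + 1) n) 1).foldl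
        (bStep n) a =
      PySem.Int.mod (a + (PySem.Int.floordiv n i *
          (min (PySem.Int.floordiv n (PySem.Int.floordiv n i) + 1) n - i) * n -
        PySem.Int.floordiv (PySem.Int.floordiv n i * (PySem.Int.floordiv n i + 1) *
          (min (PySem.Int.floordiv n (PySem.Int.floordiv n i) + 1) n - i) *
          (i + min (PySem.Int.floordiv n (PySem.Int.floordiv n i) + 1) n - 1)) 4)) pvM := by
  set k := PySem.Int.floordiv n i with hk
  set j := min (PySem.Int.floordiv n k + 1) n with hj
  have hij : i < j := i_lt_j n i h1 h2
  rw [foldl_bStep_sum n _ a (pyRange_one_ne_nil hij)]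
  have hmap : (PySem.List.pyRange i j 1).map (gterm n)
      = (PySem.List.pyRange i j 1).map
          (fun t => k * n - PySem.Int.floordiv (k * (k + 1)) 2 * t) := by
    apply List.map_congr_left
    intro t ht
    rw [PySem.List.mem_pyRange_one] at ht
    simp only [gterm]
    rw [fd_const n i t h1 h2 ht.1 ht.2]
  rw [hmap, sum_affine]
  have hlen : ((PySem.List.pyRange i j 1).length : Int) = j - i := by
    rw [PySem.List.length_pyRange_one]; omega
  have hsum : 2 * (PySem.List.pyRange i j 1).sum = (j - i) * (2 * i + (j - i) - 1) := by
    have h := two_mul_sum_pyRange i (j - i).toNat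
    have hji : (i : Int) + ((j - i).toNat : Int) = j := by omega
    rw [hji] at h
    rw [h]; congr 1 <;> omega
  obtain ⟨p, hp⟩ : Even (k * (k + 1)) := Int.even_mul_succ_self k
  have hp2 : k * (k + 1) = 2 * p := by omega
  obtain ⟨q, hq⟩ : Even ((j - i) * (i + j - 1)) := by
    rcases Int.even_or_odd (j - i) with h | h
    · exact h.mul_right _
    · obtain ⟨x, hx⟩ := h
      exact Even.mul_left ⟨x + i, by omega⟩ _
  have hq2 : (j - i) * (i + j - 1) = 2 * q := by omega
  have hbig : k * (k + 1) * (j - i) * (i + j - 1) = 4 * (p * q) := by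
    calc k * (k + 1) * (j - i) * (i + j - 1) = (k * (k + 1)) * ((j - i) * (i + j - 1)) := by ring
    _ = (2 * p) * (2 * q) := by rw [hp2, hq2]
    _ = 4 * (p * q) := by ring
  have hfd4 : PySem.Int.floordiv (k * (k + 1) * (j - i) * (i + j - 1)) 4 = p * q := by
    rw [hbig, PySem.Int.floordiv_eq_ediv_of_pos (by norm_num)]
    exact Int.mul_ediv_cancel_left _ (by norm_num)
  have hfd2 : PySem.Int.floordiv (k * (k + 1)) 2 = p := by
    rw [hp2, PySem.Int.floordiv_eq_ediv_of_pos (by norm_num)]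
    exact Int.mul_ediv_cancel_left _ (by norm_num)
  rw [hfd4, hfd2, PySem.Int.mod_eq_emod_of_pos (by norm_num [pvM])]
  congr 1
  have hsum2 : (PySem.List.pyRange i j 1).sum = q := by nlinarith [hsum, hq2]
  rw [hlen, hsum2]
  ring

theorem solveLoop_succ (n : Int) (fuel : Nat) (a i : Int) (h : i < n) :
    solveLoop n (fuel + 1) a i =
      solveLoop n fuel
        (PySem.Int.mod (a + (PySem.Int.floordiv n i *
            (min (PySem.Int.floordiv n (PySem.Int.floordiv n i) + 1) n - i) * n -
          PySem.Int.floordiv (PySem.Int.floordiv n i * (PySem.Int.floordiv n i + 1) *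
            (min (PySem.Int.floordiv n (PySem.Int.floordiv n i) + 1) n - i) *
            (i + min (PySem.Int.floordiv n (PySem.Int.floordiv n i) + 1) n - 1)) 4)) pvM)
        (min (PySem.Int.floordiv n (PySem.Int.floordiv n i) + 1) n) := by
  rw [solveLoop, if_pos h]

theorem solveLoop_eq (n : Int) :
    ∀ (fuel : Nat) (i a : Int), 1 ≤ i → i ≤ n → (n - i).toNat ≤ fuel →
      solveLoop n fuel a i = (PySem.List.pyRange i n 1).foldl (bStep n) a := by
  intro fuel
  induction fuel with
  | zero =>
    intro i a h1 h2 h3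
    have : i = n := by omega
    subst this
    rw [PySem.List.pyRange_one_eq_nil (le_refl _)]
    rfl
  | succ fuel ih =>
    intro i a h1 h2 h3
    by_cases h : i < n
    · have hij : i < min (PySem.Int.floordiv n (PySem.Int.floordiv n i) + 1) n :=
        i_lt_j n i h1 h
      have hjn : min (PySem.Int.floordiv n (PySem.Int.floordiv n i) + 1) n ≤ n :=
        min_le_right _ _
      rw [solveLoop_succ n fuel a i h]
      rw [PySem.List.pyRange_one_append i _ n (by omega) hjn, List.foldl_append]
      rw [← block_eq n a i h1 h]
      exact ih _ _ (by omega) hjn (by omega)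
    · have : i = n := by omega
      subst this
      rw [PySem.List.pyRange_one_eq_nil (le_refl _), solveLoop, if_neg h]
      rfl

-- A as a single modded sum
theorem A_sum (n : Int) (h : 2 ≤ n) :
    solve n = (n + ((PySem.List.pyRange 1 n 1).map (gterm n)).sum) % pvM := by
  unfold solve
  rw [solveLoop_eq n n.toNat 1 n (le_refl _) (by omega) (by omega)]
  exact foldl_bStep_sum n _ n (pyRange_one_ne_nil (by omega))

-- ===== B-side lemmas =====

theorem isqrtLoop_spec (n : Int) (h2 : 2 ≤ n) :
    ∀ (fuel : Nat) (s : Int), 0 ≤ s → s * s ≤ n → (n - s).toNat ≤ fuel →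
      0 ≤ isqrtLoop n fuel s ∧ isqrtLoop n fuel s * isqrtLoop n fuel s ≤ n ∧
        n < (isqrtLoop n fuel s + 1) * (isqrtLoop n fuel s + 1) := by
  intro fuel
  induction fuel with
  | zero =>
    intro s h0 hs hf
    exfalso
    have hsn : n ≤ s := by omega
    nlinarith
  | succ fuel ih =>
    intro s h0 hs hf
    rw [isqrtLoop]
    by_cases h : (s + 1) * (s + 1) ≤ n
    · rw [if_pos h]
      have hsn : s + 1 ≤ n := by nlinarith
      exact ih (s + 1) (by omega) h (by omega)
    · rw [if_neg h]
      exact ⟨h0, hs, by omega⟩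

theorem fd_antitone (n a b : Int) (h0 : 0 ≤ n) (ha : 0 < a) (hab : a ≤ b) :
    PySem.Int.floordiv n b ≤ PySem.Int.floordiv n a := by
  have hb : 0 < b := lt_of_lt_of_le ha hab
  have h1 : 0 ≤ PySem.Int.floordiv n b :=
    (PySem.Int.le_floordiv_iff_mul_le hb).mpr (by simpa)
  have h2 : PySem.Int.floordiv n b * b ≤ n :=
    (PySem.Int.le_floordiv_iff_mul_le hb).mp (le_refl _)
  rw [PySem.Int.le_floordiv_iff_mul_le ha]
  nlinarith

-- t in the open-closed interval (n // (q+1), n // q] has quotient exactly q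
theorem fd_eq_of_interval (n q t : Int) (hq : 0 < q) (ht : 0 < t)
    (h1 : PySem.Int.floordiv n (q + 1) < t) (h2 : t ≤ PySem.Int.floordiv n q) :
    PySem.Int.floordiv n t = q := by
  have ha := (PySem.Int.floordiv_eq_iff_of_pos (a := n) (b := q)
      (q := PySem.Int.floordiv n q) hq).mp rfl
  have hb := (PySem.Int.floordiv_eq_iff_of_pos (a := n) (b := q + 1)
      (q := PySem.Int.floordiv n (q + 1)) (by omega)).mp rfl
  rw [PySem.Int.floordiv_eq_iff_of_pos ht]
  constructor
  · nlinarith [ha.1]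
  · nlinarith [hb.2]

-- bounds used by all lemmas about B's second loop
theorem qbounds (n s q : Int) (hn : 2 ≤ n) (hs1 : 1 ≤ s) (hsn1 : s ≤ n - 1)
    (hq1 : 1 ≤ q) (hqQ : q ≤ PySem.Int.floordiv n (s + 1)) :
    max s (PySem.Int.floordiv n (q + 1)) ≤ min (PySem.Int.floordiv n q) (n - 1) ∧
      s + 1 ≤ PySem.Int.floordiv n q ∧ PySem.Int.floordiv n (q + 1) ≤ n - 1 := by
  have hQpos : (0:Int) < PySem.Int.floordiv n (s + 1) := by omega
  have hQle : PySem.Int.floordiv n (s + 1) * (s + 1) ≤ n :=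
    (PySem.Int.le_floordiv_iff_mul_le (by omega)).mp (le_refl _)
  have h1 : s + 1 ≤ PySem.Int.floordiv n q := by
    rw [PySem.Int.le_floordiv_iff_mul_le (by omega)]
    nlinarith
  have h2 : PySem.Int.floordiv n (q + 1) ≤ PySem.Int.floordiv n q :=
    fd_antitone n q (q + 1) (by omega) (by omega) (by omega)
  have h3 : PySem.Int.floordiv n (q + 1) ≤ n - 1 := by
    have := fd_antitone n 2 (q + 1) (by omega) (by norm_num) (by omega)
    have hn2 : PySem.Int.floordiv n 2 ≤ n - 1 := by
      have := (PySem.Int.floordiv_lt_iff_lt_mul (a := n) (b := 2)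
          (q := n) (by norm_num)).mpr (by omega)
      omega
    omega
  refine ⟨?_, h1, h3⟩
  omega

-- one iteration of B's second loop contributes exactly the terms of its t-interval
theorem qterm_eq_sum (n s q : Int) (hn : 2 ≤ n) (hs1 : 1 ≤ s) (hsn1 : s ≤ n - 1)
    (hq1 : 1 ≤ q) (hqQ : q ≤ PySem.Int.floordiv n (s + 1)) :
    qterm n s q =
      ((PySem.List.pyRange (max s (PySem.Int.floordiv n (q + 1)) + 1)
          (min (PySem.Int.floordiv n q) (n - 1) + 1) 1).map (gterm n)).sum := by
  obtain ⟨hlohi, hsq, _⟩ := qbounds n s q hn hs1 hsn1 hq1 hqQ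
  set lo := max s (PySem.Int.floordiv n (q + 1)) with hlo
  set hi := min (PySem.Int.floordiv n q) (n - 1) with hhi
  have hmap : (PySem.List.pyRange (lo + 1) (hi + 1) 1).map (gterm n)
      = (PySem.List.pyRange (lo + 1) (hi + 1) 1).map
          (fun t => q * n - PySem.Int.floordiv (q * (q + 1)) 2 * t) := by
    apply List.map_congr_left
    intro t ht
    rw [PySem.List.mem_pyRange_one] at ht
    simp only [gterm]
    rw [fd_eq_of_interval n q t (by omega) (by omega) (by omega) (by omega)]
  rw [hmap, sum_affine]
  have hlen : ((PySem.List.pyRange (lo + 1) (hi + 1) 1).length : Int) = hi - lo := by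
    rw [PySem.List.length_pyRange_one]; omega
  have hsum : 2 * (PySem.List.pyRange (lo + 1) (hi + 1) 1).sum
      = (hi - lo) * (lo + 1 + hi) := by
    have h := two_mul_sum_pyRange (lo + 1) (hi + 1 - (lo + 1)).toNat
    have hji : (lo + 1 : Int) + ((hi + 1 - (lo + 1)).toNat : Int) = hi + 1 := by omega
    rw [hji] at h
    rw [h]
    have : ((hi + 1 - (lo + 1)).toNat : Int) = hi - lo := by omega
    rw [this]; ring
  obtain ⟨p, hp⟩ : Even (q * (q + 1)) := Int.even_mul_succ_self q
  have hp2 : q * (q + 1) = 2 * p := by omega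
  have hT : PySem.Int.floordiv ((lo + 1 + hi) * (hi - lo)) 2
      = (PySem.List.pyRange (lo + 1) (hi + 1) 1).sum := by
    have hx : (lo + 1 + hi) * (hi - lo)
        = 2 * (PySem.List.pyRange (lo + 1) (hi + 1) 1).sum := by linarith [hsum]
    rw [hx, PySem.Int.floordiv_eq_ediv_of_pos (by norm_num)]
    exact Int.mul_ediv_cancel_left _ (by norm_num)
  have hfd2 : PySem.Int.floordiv (q * (q + 1)) 2 = p := by
    rw [hp2, PySem.Int.floordiv_eq_ediv_of_pos (by norm_num)]
    exact Int.mul_ediv_cancel_left _ (by norm_num)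
  simp only [qterm, ← hlo, ← hhi, hT, hfd2]
  rw [hlen]
  ring

-- B's second loop telescopes over the t-intervals
theorem qsum_telescope (n s : Int) (hn : 2 ≤ n) (hs1 : 1 ≤ s) (hsn1 : s ≤ n - 1) :
    ∀ Q : Int, 1 ≤ Q → Q ≤ PySem.Int.floordiv n (s + 1) →
      ((PySem.List.pyRange 1 (Q + 1) 1).map (qterm n s)).sum
        = ((PySem.List.pyRange (max s (PySem.Int.floordiv n (Q + 1)) + 1) n 1).map
            (gterm n)).sum := by
  intro Q hQ1
  induction Q, hQ1 using Int.le_induction with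
  | base =>
    intro hQQ
    rw [show (1:Int) + 1 = 2 by norm_num, show PySem.List.pyRange 1 2 1 = [1] from
      PySem.List.pyRange_one_singleton 1]
    simp only [List.map_cons, List.map_nil, List.sum_cons, List.sum_nil, add_zero]
    rw [qterm_eq_sum n s 1 hn hs1 hsn1 (le_refl _) hQQ]
    have hfd1 : PySem.Int.floordiv n 1 = n := by
      rw [PySem.Int.floordiv_eq_ediv_of_pos (by norm_num)]; exact Int.ediv_one n
    rw [hfd1]
    have h1 : min n (n - 1) = n - 1 := by omega
    rw [h1]
    have h2 : n - 1 + 1 = n := by ring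
    rw [h2]
    norm_num
  | succ Q hQ1 ih =>
    intro hQQ
    obtain ⟨_, hsq, _⟩ := qbounds n s (Q + 1) hn hs1 hsn1 (by omega) hQQ
    obtain ⟨hlohi', _, _⟩ := qbounds n s Q hn hs1 hsn1 hQ1 (by omega)
    have hQfd : s + 1 ≤ PySem.Int.floordiv n (Q + 1) := by
      have := (qbounds n s (Q + 1) hn hs1 hsn1 (by omega) hQQ).2.1
      -- s + 1 ≤ n // (Q+1): from q = Q+1 ≤ n//(s+1) duality
      have hQle : (Q + 1) * (s + 1) ≤ n := by
        have := (PySem.Int.le_floordiv_iff_mul_le (a := n) (b := s + 1)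
            (q := Q + 1) (by omega)).mp hQQ
        exact this
      rw [PySem.Int.le_floordiv_iff_mul_le (by omega)]
      nlinarith
    have hfdn1 : PySem.Int.floordiv n (Q + 1) ≤ n - 1 := by
      have := (qbounds n s Q hn hs1 hsn1 hQ1 (by omega)).2.2
      have h2 := fd_antitone n 2 (Q + 1) (by omega) (by norm_num) (by omega)
      have hn2 : PySem.Int.floordiv n 2 ≤ n - 1 := by
        have := (PySem.Int.floordiv_lt_iff_lt_mul (a := n) (b := 2)
            (q := n) (by norm_num)).mpr (by omega)
        omega
      omega
    rw [PySem.List.pyRange_one_succ_right (by omega : (1:Int) ≤ Q + 1), List.map_append,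
      List.sum_append, ih (by omega)]
    simp only [List.map_cons, List.map_nil, List.sum_cons, List.sum_nil, add_zero]
    rw [qterm_eq_sum n s (Q + 1) hn hs1 hsn1 (by omega) hQQ]
    -- the interval for q = Q+1 ends exactly where the previous ones begin
    have hmaxQ : max s (PySem.Int.floordiv n (Q + 1)) = PySem.Int.floordiv n (Q + 1) := by
      omega
    have hminQ : min (PySem.Int.floordiv n (Q + 1)) (n - 1)
        = PySem.Int.floordiv n (Q + 1) := by omega
    rw [hmaxQ, hminQ]
    rw [add_comm, ← List.sum_append, ← List.map_append]
    congr 1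
    rw [← PySem.List.pyRange_one_append _ (PySem.Int.floordiv n (Q + 1) + 1) n
      (by omega) (by omega)]

-- B as the same single modded sum
theorem B_sum (n : Int) (h : 2 ≤ n) :
    solve_alt n = (n + ((PySem.List.pyRange 1 n 1).map (gterm n)).sum) % pvM := by
  unfold solve_alt
  rw [if_neg (by omega)]
  show (PySem.List.pyRange 1 (PySem.Int.floordiv n (isqrtLoop n n.toNat 0 + 1) + 1) 1).foldl
      (qStep n (isqrtLoop n n.toNat 0))
      ((PySem.List.pyRange 1 (isqrtLoop n n.toNat 0 + 1) 1).foldl (bStep n) n) = _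
  obtain ⟨hs0, hss, hsn⟩ := isqrtLoop_spec n h n.toNat 0 (le_refl _) (by omega) (by omega)
  set s := isqrtLoop n n.toNat 0 with hsdef
  have hs1 : 1 ≤ s := by
    by_contra hc
    have : s = 0 := by omega
    rw [this] at hsn
    omega
  have hsn1 : s ≤ n - 1 := by nlinarith
  have hQ1 : 1 ≤ PySem.Int.floordiv n (s + 1) := by
    rw [PySem.Int.le_floordiv_iff_mul_le (by omega)]
    omega
  have hfdQ : PySem.Int.floordiv n (PySem.Int.floordiv n (s + 1) + 1) ≤ s := by
    by_contra hc
    have h1 : (s + 1) * (PySem.Int.floordiv n (s + 1) + 1) ≤ n := by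
      have := (PySem.Int.le_floordiv_iff_mul_le (a := n)
          (b := PySem.Int.floordiv n (s + 1) + 1) (q := s + 1) (by omega)).mp (by omega)
      exact this
    have h2 : n < (PySem.Int.floordiv n (s + 1) + 1) * (s + 1) :=
      ((PySem.Int.floordiv_eq_iff_of_pos (a := n) (b := s + 1)
        (q := PySem.Int.floordiv n (s + 1)) (by omega)).mp rfl).2
    nlinarith
  rw [foldl_bStep_sum n _ n (pyRange_one_ne_nil (by omega)), qStep_fun,
    foldl_mod_sum (qterm n s) _ _ (pyRange_one_ne_nil (by omega))]
  rw [qsum_telescope n s h hs1 hsn1 (PySem.Int.floordiv n (s + 1)) hQ1 (le_refl _)]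
  have hmax : max s (PySem.Int.floordiv n (PySem.Int.floordiv n (s + 1) + 1)) = s := by
    omega
  rw [hmax, Int.emod_add_emod]
  rw [PySem.List.pyRange_one_append 1 (s + 1) n (by omega) (by omega), List.map_append,
    List.sum_append]
  congr 1
  ring

-- ===== VERDICT (by name: the statement is the Claim_ definition above) =====
theorem solve_spec : Claim_equal_solve := by
  intro n _
  unfold Spec_solve
  by_cases h : 2 ≤ n
  · rw [A_sum n h, B_sum n h]
  · have halt : solve_alt n = n := by unfold solve_alt; rw [if_pos (by omega)]
    rw [halt]
    unfold solve
    by_cases h1 : 1 ≤ n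
    · rw [solveLoop_eq n n.toNat 1 n (le_refl _) h1 (by omega)]
      rw [PySem.List.pyRange_one_eq_nil (by omega)]
      rfl
    · have : n.toNat = 0 := by omega
      rw [this]
      rfl
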